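-- pv_equiv track=rewrite | github.com/V969-hub/dachupy | app/schema_sync.py | _split_sql_fragment
-- ===== SOURCE A (Python) =====
-- _COLUMN_ATTRIBUTE_KEYWORDS = (
--     "NOT NULL",
--     "NULL",
--     "DEFAULT",
--     "COMMENT",
--     "PRIMARY KEY",
--     "ON UPDATE",
--     "AUTO_INCREMENT",
-- )
--
-- def _split_sql_fragment(value: str, stop_keywords: tuple[str, ...] = _COLUMN_ATTRIBUTE_KEYWORDS) -> tuple[str, str]:
--     text = value.lstrip()
--     if not text:
--         return "", ""
--
--     depth = 0
--     quote_char = ""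
--     index = 0
--
--     while index < len(text):
--         char = text[index]
--
--         if quote_char:
--             if char == quote_char:
--                 if index + 1 < len(text) and text[index + 1] == quote_char:
--                     index += 2
--                     continue
--                 quote_char = ""
--         else:
--             if char in {"'", '"'}:
--                 quote_char = char
--             elif char == "(":
--                 depth += 1
--             elif char == ")":
--                 depth = max(depth - 1, 0)
--             elif char.isspace() and depth == 0:
--                 remainder = text[index:].lstrip()
--                 remainder_upper = remainder.upper()
--                 if any(remainder_upper.startswith(keyword) for keyword in stop_keywords):
--                     return text[:index].rstrip(), remainder
--
--         index += 1
--
--     return text.rstrip(), ""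
-- ===== SOURCE B (Python) =====
-- _COLUMN_ATTRIBUTE_KEYWORDS = (
--     "NOT NULL",
--     "NULL",
--     "DEFAULT",
--     "COMMENT",
--     "PRIMARY KEY",
--     "ON UPDATE",
--     "AUTO_INCREMENT",
-- )
--
-- def _split_sql_fragment(value: str, stop_keywords: tuple[str, ...] = _COLUMN_ATTRIBUTE_KEYWORDS) -> tuple[str, str]:
--     text = value.lstrip()
--     if not text:
--         return "", ""
--
--     # Pass 1: one state-machine sweep collecting every unquoted, depth-0
--     # whitespace offset (the candidate split points).
--     candidates = []
--     depth = 0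
--     quote = ""
--     skip = False
--     for i, ch in enumerate(text):
--         if skip:
--             skip = False
--         elif quote:
--             if ch == quote:
--                 if i + 1 < len(text) and text[i + 1] == quote:
--                     skip = True
--                 else:
--                     quote = ""
--         elif ch in ("'", '"'):
--             quote = ch
--         elif ch == "(":
--             depth += 1
--         elif ch == ")":
--             depth = max(depth - 1, 0)
--         elif ch.isspace() and depth == 0:
--             candidates.append(i)
--
--     # Pass 2: first candidate whose remainder starts with a stop keyword.
--     for i in candidates:
--         remainder = text[i:].lstrip()
--         upper = remainder.upper()
--         if any(upper.startswith(keyword) for keyword in stop_keywords):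
--             return text[:i].rstrip(), remainder
--     return text.rstrip(), ""
-- ===== Notes on version B (the rewrite author's own statement) =====
-- stated objective: alternative
-- what changed: Replaces A's single early-returning while-loop (with index jumps for doubled quotes) by two distinct phases: a for-loop state-machine sweep with a skip flag that collects all unquoted depth-0 whitespace offsets, then a separate first-match search over those candidate offsets.
import Mathlib
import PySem

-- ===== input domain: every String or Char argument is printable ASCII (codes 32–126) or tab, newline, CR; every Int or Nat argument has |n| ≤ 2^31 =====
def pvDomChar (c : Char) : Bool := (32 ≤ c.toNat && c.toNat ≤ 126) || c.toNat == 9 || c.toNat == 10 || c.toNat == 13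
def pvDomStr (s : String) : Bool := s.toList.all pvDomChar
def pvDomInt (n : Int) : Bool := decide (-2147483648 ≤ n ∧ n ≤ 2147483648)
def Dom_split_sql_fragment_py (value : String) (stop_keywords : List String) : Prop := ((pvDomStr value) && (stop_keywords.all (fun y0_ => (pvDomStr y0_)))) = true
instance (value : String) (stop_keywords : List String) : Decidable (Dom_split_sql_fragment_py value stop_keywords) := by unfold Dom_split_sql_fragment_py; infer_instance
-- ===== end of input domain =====

-- B replaces A's early-returning while-loop by two distinct phases (a candidate-collecting
-- state-machine sweep, then a first-match search over the candidates); objective: alternative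
-- decomposition, equal value everywhere.

-- ===== PORT A =====
-- A's while-loop: index recursion with +1 / +2 jumps, early return at the first matching split.
def pvLoopA (kws : List String) (text : List Char) (index : Nat) (depth : Nat) (quote : Option Char) : List String :=
  if h : index < text.length then
    match quote with
    | some q =>
      if text[index] = q then
        if text[index + 1]? = some q then
          pvLoopA kws text (index + 2) depth (some q)
        else
          pvLoopA kws text (index + 1) depth none
      else pvLoopA kws text (index + 1) depth (some q)
    | none =>
      if text[index] = '\'' ∨ text[index] = '"' then pvLoopA kws text (index + 1) depth (some text[index])
      else if text[index] = '(' then pvLoopA kws text (index + 1) (depth + 1) none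
      else if text[index] = ')' then pvLoopA kws text (index + 1) (depth - 1) none  -- Nat '-' is max(depth-1,0)
      else if PySem.Chars.isspace text[index] ∧ depth = 0 then
        -- remainder = text[index:].lstrip(); remainder_upper = remainder.upper()
        if kws.any (fun k =>
            PySem.Chars.startswith (PySem.Chars.upper (PySem.Chars.lstrip (text.drop index))) k.toList) then
          [String.ofList (PySem.Chars.rstrip (text.take index)),
           String.ofList (PySem.Chars.lstrip (text.drop index))]
        else pvLoopA kws text (index + 1) depth none
      else pvLoopA kws text (index + 1) depth none
  else [String.ofList (PySem.Chars.rstrip text), ""]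
termination_by text.length - index

def split_sql_fragment_py (value : String) (stop_keywords : List String) : List String :=
  let text := PySem.Chars.lstrip value.toList
  if text = [] then ["", ""]
  else pvLoopA stop_keywords text 0 0 none

-- ===== PORT B =====
-- B's pass 1: one step of the for-loop over enumerate(text) with state (depth, quote, skip, candidates).
def pvStepB (text : List Char) (st : Nat × Option Char × Bool × List Int) (p : Int × Char) :
    Nat × Option Char × Bool × List Int :=
  let (depth, quote, skip, cands) := st
  if skip then (depth, quote, false, cands)
  else match quote with
    | some q =>
      if p.2 = q then
        if PySem.List.pyGet? text (p.1 + 1) = some q then (depth, some q, true, cands)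
        else (depth, none, false, cands)
      else (depth, some q, false, cands)
    | none =>
      if p.2 = '\'' ∨ p.2 = '"' then (depth, some p.2, false, cands)
      else if p.2 = '(' then (depth + 1, none, false, cands)
      else if p.2 = ')' then (depth - 1, none, false, cands)
      else if PySem.Chars.isspace p.2 ∧ depth = 0 then (depth, none, false, cands ++ [p.1])
      else (depth, none, false, cands)

def split_sql_fragment_py_alt (value : String) (stop_keywords : List String) : List String :=
  let text := PySem.Chars.lstrip value.toList
  if text = [] then ["", ""]
  else
    let candidates := ((PySem.List.enumerate text 0).foldl (pvStepB text) (0, none, false, [])).2.2.2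
    match candidates.find? (fun i =>
        stop_keywords.any (fun k =>
          PySem.Chars.startswith
            (PySem.Chars.upper (PySem.Chars.lstrip (PySem.List.slice text (some i) none))) k.toList)) with
    | some i =>
        [String.ofList (PySem.Chars.rstrip (PySem.List.slice text none (some i))),
         String.ofList (PySem.Chars.lstrip (PySem.List.slice text (some i) none))]
    | none => [String.ofList (PySem.Chars.rstrip text), ""]

-- ===== PRECONDITION & SPEC =====
def Spec_split_sql_fragment_py (value : String) (stop_keywords : List String) (out : List String) : Prop := out = split_sql_fragment_py_alt value stop_keywords
instance (value : String) (stop_keywords : List String) (out : List String) : Decidable (Spec_split_sql_fragment_py value stop_keywords out) := by unfold Spec_split_sql_fragment_py; infer_instance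

-- ===== CLAIM (what is proved, stated in full; the proofs are below) =====
def Claim_equal_split_sql_fragment_py : Prop := ∀ (value : String) (stop_keywords : List String), Dom_split_sql_fragment_py value stop_keywords → Spec_split_sql_fragment_py value stop_keywords (split_sql_fragment_py value stop_keywords)

-- ===== LEMMAS AND PROOFS =====

-- The candidate offsets A's loop visits from state (index, depth, quote): same recursion as pvLoopA.
def pvCand (text : List Char) (index : Nat) (depth : Nat) (quote : Option Char) : List Int :=
  if h : index < text.length then
    match quote with
    | some q =>
      if text[index] = q then
        if text[index + 1]? = some q then pvCand text (index + 2) depth (some q)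
        else pvCand text (index + 1) depth none
      else pvCand text (index + 1) depth (some q)
    | none =>
      if text[index] = '\'' ∨ text[index] = '"' then pvCand text (index + 1) depth (some text[index])
      else if text[index] = '(' then pvCand text (index + 1) (depth + 1) none
      else if text[index] = ')' then pvCand text (index + 1) (depth - 1) none
      else if PySem.Chars.isspace text[index] ∧ depth = 0 then
        (index : Int) :: pvCand text (index + 1) depth none
      else pvCand text (index + 1) depth none
  else []
termination_by text.length - index

-- B's phase 2 as a function of the candidate list.
def pvRes (kws : List String) (text : List Char) (cands : List Int) : List String :=
  match cands.find? (fun i =>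
      kws.any (fun k =>
        PySem.Chars.startswith
          (PySem.Chars.upper (PySem.Chars.lstrip (PySem.List.slice text (some i) none))) k.toList)) with
  | some i =>
      [String.ofList (PySem.Chars.rstrip (PySem.List.slice text none (some i))),
       String.ofList (PySem.Chars.lstrip (PySem.List.slice text (some i) none))]
  | none => [String.ofList (PySem.Chars.rstrip text), ""]

-- A's loop = phase 2 applied to its candidate list.
theorem pvLoopA_eq_pvRes (kws : List String) (text : List Char) :
    ∀ index depth quote, pvLoopA kws text index depth quote = pvRes kws text (pvCand text index depth quote) := by
  intro index depth quote
  fun_induction pvLoopA kws text index depth quote with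
  | _ => rw [pvCand]; split_ifs <;> simp_all [pvRes, List.find?, PySem.List.slice_from_natCast, PySem.List.slice_to_natCast, -List.any_eq_true, -List.any_eq_false]

theorem pvGetCast (xs : List Char) (k : Nat) :
    PySem.List.pyGet? xs ((k : Int) + 1) = xs[k + 1]? := by
  rw [show ((k : Int) + 1) = ((k + 1 : Nat) : Int) by push_cast; ring, PySem.List.pyGet?_natCast]

theorem pvEnumDrop (text : List Char) (i : Nat) (h : i < text.length) :
    (PySem.List.enumerate text 0).drop i
      = ((i : Int), text[i]) :: (PySem.List.enumerate text 0).drop (i + 1) := by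
  have hl : i < (PySem.List.enumerate text 0).length := by
    rw [PySem.List.length_enumerate]; exact h
  rw [List.drop_eq_getElem_cons hl, PySem.List.getElem_enumerate]
  simp

theorem pvFold_eq_pvCand (text : List Char) :
    ∀ index depth quote acc,
      (((PySem.List.enumerate text 0).drop index).foldl (pvStepB text) (depth, quote, false, acc)).2.2.2
        = acc ++ pvCand text index depth quote := by
  intro index depth quote
  fun_induction pvCand text index depth quote with
  | case1 idx dep hlt hdq ih =>
    intro acc
    obtain ⟨h4, -⟩ := List.getElem?_eq_some_iff.mp hdq
    rw [pvEnumDrop text idx hlt, List.foldl_cons, pvEnumDrop text (idx + 1) h4, List.foldl_cons]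
    simp [pvStepB, pvGetCast, hdq, ih acc]
  | case2 idx dep hlt hnd ih =>
    intro acc
    rw [pvEnumDrop text idx hlt, List.foldl_cons]
    simp [pvStepB, pvGetCast, hnd, ih acc]
  | case3 idx dep hlt q hne ih =>
    intro acc
    rw [pvEnumDrop text idx hlt, List.foldl_cons]
    simp [pvStepB, hne, ih acc]
  | case4 idx dep hlt hq ih =>
    intro acc
    rw [pvEnumDrop text idx hlt, List.foldl_cons]
    simp [pvStepB, hq, ih acc]
  | case5 idx dep hlt h1 h2 ih =>
    intro acc
    rw [pvEnumDrop text idx hlt, List.foldl_cons]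
    simp [pvStepB, h2, ih acc]
  | case6 idx dep hlt h1 h2 h3 ih =>
    intro acc
    rw [pvEnumDrop text idx hlt, List.foldl_cons]
    simp [pvStepB, h3, ih acc]
  | case7 idx dep hlt h1 h2 h3 h4 ih =>
    intro acc
    rw [pvEnumDrop text idx hlt, List.foldl_cons]
    simp only [pvStepB]
    split_ifs <;> simp_all
  | case8 idx dep hlt h1 h2 h3 h4 ih =>
    intro acc
    rw [pvEnumDrop text idx hlt, List.foldl_cons]
    simp only [pvStepB]
    split_ifs <;> simp_all
  | case9 idx dep q hge =>
    intro acc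
    rw [List.drop_eq_nil_of_le (by rw [PySem.List.length_enumerate]; omega)]
    simp_all

-- ===== VERDICT (by name: the statement is the Claim_ definition above) =====
theorem split_sql_fragment_py_spec : Claim_equal_split_sql_fragment_py := by
  intro value stop_keywords _
  unfold Spec_split_sql_fragment_py split_sql_fragment_py split_sql_fragment_py_alt
  by_cases h : PySem.Chars.lstrip value.toList = []
  · simp [h]
  · simp only [h, if_false]
    rw [pvLoopA_eq_pvRes, ← List.drop_zero (l := PySem.List.enumerate _ 0), pvFold_eq_pvCand]
    rfl
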